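-- pv_equiv track=rewrite | github.com/Algorithm-Study/Algorithm | implementation/P12938_윤상준.py | solution
-- ===== SOURCE A (Python) =====
-- def solution(n, s):
--     answer = []
--     if s < n:
--         return [-1]
--     for i in range(n,0,-1):
--         answer.append(s//i)
--         s = s - s//i
--     return answer
-- ===== SOURCE B (Python) =====
-- def solution(n, s):
--     if s < n:
--         return [-1]
--     if n <= 0:
--         return []
--     q, r = divmod(s, n)
--     return [q] * (n - r) + [q + 1] * r
-- ===== Notes on version B (the rewrite author's own statement) =====
-- stated objective: faster
-- what changed: Replaces the greedy per-index subtract loop with the closed-form equal split q,r=divmod(s,n); [q]*(n-r)+[q+1]*r (empty for n<=0, matching A's empty range).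
import Mathlib
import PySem

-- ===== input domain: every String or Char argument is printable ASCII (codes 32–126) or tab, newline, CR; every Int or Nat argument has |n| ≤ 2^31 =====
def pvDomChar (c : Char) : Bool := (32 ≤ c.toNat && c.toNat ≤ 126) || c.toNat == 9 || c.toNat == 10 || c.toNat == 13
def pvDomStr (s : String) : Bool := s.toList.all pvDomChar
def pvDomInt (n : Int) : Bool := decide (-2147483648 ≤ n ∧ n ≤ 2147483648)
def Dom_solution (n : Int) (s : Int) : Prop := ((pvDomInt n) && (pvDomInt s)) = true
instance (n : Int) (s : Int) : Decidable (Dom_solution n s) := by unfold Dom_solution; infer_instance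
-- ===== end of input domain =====

-- B replaces A's greedy per-index subtract loop by the closed-form equal split (divmod); objective: faster (constant-factor).


-- ===== PORT A =====
def solution (n : Int) (s : Int) : List Int :=
  if s < n then [-1]
  else
    ((PySem.List.pyRange n 0 (-1)).foldl
      (fun (p : List Int × Int) i =>
        (p.1 ++ [PySem.Int.floordiv p.2 i], p.2 - PySem.Int.floordiv p.2 i))
      ([], s)).1

-- ===== PORT B =====
def solution_alt (n : Int) (s : Int) : List Int :=
  if s < n then [-1]
  else if n ≤ 0 then []
  else
    let q := PySem.Int.floordiv s n
    let r := PySem.Int.mod s n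
    List.replicate (n - r).toNat q ++ List.replicate r.toNat (q + 1)

-- ===== PRECONDITION & SPEC =====
def Spec_solution (n : Int) (s : Int) (out : List Int) : Prop := out = solution_alt n s
instance (n : Int) (s : Int) (out : List Int) : Decidable (Spec_solution n s out) := by unfold Spec_solution; infer_instance

-- ===== CLAIM (what is proved, stated in full; the proofs are below) =====
def Claim_equal_solution : Prop := ∀ (n : Int) (s : Int), Dom_solution n s → Spec_solution n s (solution n s)

-- ===== LEMMAS AND PROOFS =====

-- The loop of A, from counter i = k down to 1 with current remainder s, produces the equal split.
lemma loop_closed (k : Nat) (hk : 1 ≤ k) : ∀ (acc : List Int) (s : Int), 0 ≤ s →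
    ((PySem.List.pyRange (k : Int) 0 (-1)).foldl
      (fun (p : List Int × Int) i =>
        (p.1 ++ [PySem.Int.floordiv p.2 i], p.2 - PySem.Int.floordiv p.2 i))
      (acc, s)).1
    = acc ++ List.replicate (k - (s % (k : Int)).toNat) (s / (k : Int))
          ++ List.replicate ((s % (k : Int)).toNat) (s / (k : Int) + 1) := by
  induction k with
  | zero => omega
  | succ k ih =>
    intro acc s hs
    rw [PySem.List.pyRange_neg_one_cons (by exact_mod_cast Nat.succ_pos k)]
    simp only [List.foldl_cons]
    have hkpos : (0 : Int) < (k : Int) + 1 := by exact_mod_cast Nat.succ_pos k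
    push_cast
    rw [show ((k : Int) + 1) - 1 = (k : Int) by ring]
    set q := s / ((k : Int) + 1) with hq
    set r := s % ((k : Int) + 1) with hr
    have hdm : ((k : Int) + 1) * q + r = s := Int.mul_ediv_add_emod s ((k : Int) + 1)
    have hr0 : 0 ≤ r := Int.emod_nonneg s (by omega)
    have hrlt : r < (k : Int) + 1 := Int.emod_lt_of_pos s hkpos
    have hfd : PySem.Int.floordiv s ((k : Int) + 1) = q := by
      rw [PySem.Int.floordiv_eq_ediv_of_pos hkpos]
    rw [hfd]
    have hs' : s - q = (k : Int) * q + r := by rw [← hdm]; ring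
    by_cases hk0 : k = 0
    · subst hk0
      simp only [Nat.cast_zero, PySem.List.pyRange_neg_one_eq_nil (le_refl (0 : Int)),
        List.foldl_nil]
      have hre : r = 0 := by omega
      simp [hre, hq]
    · have hk1 : 1 ≤ k := Nat.one_le_iff_ne_zero.mpr hk0
      have hkne : (k : Int) ≠ 0 := by exact_mod_cast hk0
      have hq0 : 0 ≤ q := Int.ediv_nonneg hs (by omega)
      have hkq0 : 0 ≤ (k : Int) * q := mul_nonneg (by positivity) hq0
      rw [ih hk1 _ (s - q) (by omega)]
      by_cases hcase : r < (k : Int)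
      · have hdiv : (s - q) / (k : Int) = q := by
          rw [hs', show (k : Int) * q + r = r + (k : Int) * q by ring,
            Int.add_mul_ediv_left r q hkne, Int.ediv_eq_zero_of_lt hr0 hcase, zero_add]
        have hmod : (s - q) % (k : Int) = r := by
          rw [hs', show (k : Int) * q + r = r + (k : Int) * q by ring,
            Int.add_mul_emod_self_left r (k : Int) q, Int.emod_eq_of_lt hr0 hcase]
        rw [hdiv, hmod]
        have h1 : (k + 1 : Nat) - r.toNat = ((k : Nat) - r.toNat) + 1 := by omega
        rw [h1, List.replicate_succ]
        simp
      · have hre : r = (k : Int) := by omega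
        have hdiv : (s - q) / (k : Int) = q + 1 := by
          rw [hs', hre, show (k : Int) * q + (k : Int) = (q + 1) * (k : Int) by ring,
            Int.mul_ediv_cancel _ hkne]
        have hmod : (s - q) % (k : Int) = 0 := by
          rw [hs', hre, show (k : Int) * q + (k : Int) = 0 + (k : Int) * (q + 1) by ring,
            Int.add_mul_emod_self_left 0 (k : Int) (q + 1)]
          simp
        rw [hdiv, hmod]
        have h1 : (k + 1 : Nat) - r.toNat = 1 := by omega
        have h2 : r.toNat = k := by omega
        rw [h1, h2]
        simp

-- ===== VERDICT (by name: the statement is the Claim_ definition above) =====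
theorem solution_spec : Claim_equal_solution := by
  intro n s _
  unfold Spec_solution solution solution_alt
  by_cases h1 : s < n
  · simp [h1]
  · simp only [if_neg h1]
    by_cases h2 : n ≤ 0
    · rw [PySem.List.pyRange_neg_one_eq_nil h2]
      simp [h2]
    · have hn1 : 1 ≤ n := by omega
      have hs0 : 0 ≤ s := by omega
      lift n to Nat using (by omega) with k
      have hk : 1 ≤ k := by exact_mod_cast hn1
      rw [loop_closed k hk [] s hs0]
      simp only [if_neg h2]
      rw [PySem.Int.floordiv_eq_ediv_of_pos (by exact_mod_cast hk : (0:Int) < k),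
        PySem.Int.mod_eq_emod_of_pos (by exact_mod_cast hk : (0:Int) < k)]
      have hr0 : 0 ≤ s % (k : Int) := Int.emod_nonneg s (by positivity)
      have hrlt : s % (k : Int) < (k : Int) := Int.emod_lt_of_pos s (by exact_mod_cast hk)
      have h1 : ((k : Int) - s % (k : Int)).toNat = k - (s % (k : Int)).toNat := by omega
      rw [h1, List.nil_append]
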